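-- pv_equiv track=rewrite | github.com/dastisht/l2.6 | l26.z3.py | queens
-- ===== SOURCE A (Python) =====
-- def queens(q):
--     for i in range(8):
--         for j in range(i + 1, 8):
--             if q[i][0] == q[j][0] or q[i][1] == q[j][1]:
--
--                 return False
--             if abs(q[i][0] - q[j][0]) == abs(q[i][1] - q[j][1]):
--
--                 return False
--     return True
-- ===== SOURCE B (Python) =====
-- def queens(q):
--     cols, rows, diag, anti = set(), set(), set(), set()
--     for i in range(8):
--         c, r = q[i][0], q[i][1]
--         if c in cols or r in rows or c - r in diag or c + r in anti:
--             return False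
--         cols.add(c)
--         rows.add(r)
--         diag.add(c - r)
--         anti.add(c + r)
--     return True
-- ===== Notes on version B (the rewrite author's own statement) =====
-- stated objective: simpler
-- what changed: Replaced the nested all-pairs double loop with a single left-to-right pass that maintains four seen-sets (columns, rows, col-row diagonals, col+row anti-diagonals) and rejects a queen that hits any set.
-- outside the precondition, e.g. on queens([[5], [5]]): A returns False, B raises IndexError
import Mathlib
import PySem

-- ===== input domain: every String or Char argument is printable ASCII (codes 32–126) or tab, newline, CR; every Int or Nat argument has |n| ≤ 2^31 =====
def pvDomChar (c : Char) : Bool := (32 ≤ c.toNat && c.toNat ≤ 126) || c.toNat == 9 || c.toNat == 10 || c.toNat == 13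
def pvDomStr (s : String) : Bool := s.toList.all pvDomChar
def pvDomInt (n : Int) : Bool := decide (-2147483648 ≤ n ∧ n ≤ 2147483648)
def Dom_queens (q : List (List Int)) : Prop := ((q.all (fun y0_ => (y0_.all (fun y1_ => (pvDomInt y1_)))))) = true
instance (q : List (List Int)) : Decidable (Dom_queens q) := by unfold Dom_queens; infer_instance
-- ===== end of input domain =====

-- B replaces A's nested all-pairs scan by one linear pass over the 8 queens maintaining four seen-sets (simpler; same results).

-- ===== PORT A =====
-- q[i][0] / q[i][1]: total readers (Python's IndexError cases are excluded by Pre_queens)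
def qCol (q : List (List Int)) (i : Int) : Int := PySem.List.pyGetD (PySem.List.pyGetD q i []) 0 0
def qRow (q : List (List Int)) (i : Int) : Int := PySem.List.pyGetD (PySem.List.pyGetD q i []) 1 0

def queens (q : List (List Int)) : Bool :=
  (PySem.List.pyRange 0 8 1).all fun i =>
    (PySem.List.pyRange (i + 1) 8 1).all fun j =>
      !(qCol q i == qCol q j || qRow q i == qRow q j) &&
      !((qCol q i - qCol q j).natAbs == (qRow q i - qRow q j).natAbs)

-- ===== PORT B =====
def queensGo (q : List (List Int)) : List Int → PySem.Set Int → PySem.Set Int → PySem.Set Int → PySem.Set Int → Bool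
  | [], _, _, _, _ => true
  | i :: is, cols, rows, diag, anti =>
    let c := qCol q i
    let r := qRow q i
    if PySem.Set.contains cols c || PySem.Set.contains rows r ||
       PySem.Set.contains diag (c - r) || PySem.Set.contains anti (c + r) then false
    else queensGo q is (PySem.Set.add cols c) (PySem.Set.add rows r)
           (PySem.Set.add diag (c - r)) (PySem.Set.add anti (c + r))

def queens_alt (q : List (List Int)) : Bool :=
  queensGo q (PySem.List.pyRange 0 8 1) PySem.Set.empty PySem.Set.empty PySem.Set.empty PySem.Set.empty

-- ===== PRECONDITION & SPEC =====
-- Pre_queens excludes the inputs where the Python raises IndexError (fewer than 8 rows, or a row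
-- shorter than 2, reached before any conflict) and also the degenerate boards with a row of length
-- < 2 on which A happens to return False because the missing cell is only needed AFTER the first
-- comparison already matched (e.g. [[5],[5]]); B indexes both cells of each row and raises there.
def Pre_queens (q : List (List Int)) : Prop :=
  (8 ≤ q.length ∧ ∀ r ∈ q.take 8, 2 ≤ r.length) ∨
  (∃ j ∈ PySem.List.pyRange 1 8 1, j < (q.length : Int) ∧
     (∀ r ∈ q.take (j.toNat + 1), 2 ≤ r.length) ∧
     (qCol q 0 = qCol q j ∨ qRow q 0 = qRow q j ∨
      (qCol q 0 - qCol q j).natAbs = (qRow q 0 - qRow q j).natAbs))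
instance (q : List (List Int)) : Decidable (Pre_queens q) := by unfold Pre_queens; infer_instance

def pvWitness_queens : List (List Int) :=
  [[0, 0], [1, 4], [2, 7], [3, 5], [4, 2], [5, 6], [6, 1], [7, 3]]

def Spec_queens (q : List (List Int)) (out : Bool) : Prop := out = queens_alt q
instance (q : List (List Int)) (out : Bool) : Decidable (Spec_queens q out) := by unfold Spec_queens; infer_instance

-- ===== CLAIM (what is proved, stated in full; the proofs are below) =====
def Claim_equal_queens : Prop := ∀ (q : List (List Int)), Dom_queens q → Pre_queens q → Spec_queens q (queens q)

-- ===== LEMMAS AND PROOFS =====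

-- the conflict-free relation both programs test, in propositional form
def NoConf (q : List (List Int)) (i j : Int) : Prop :=
  qCol q i ≠ qCol q j ∧ qRow q i ≠ qRow q j ∧
  qCol q i - qRow q i ≠ qCol q j - qRow q j ∧
  qCol q i + qRow q i ≠ qCol q j + qRow q j

-- A's per-pair test is NoConf
lemma pair_iff (c1 r1 c2 r2 : Int) :
    (!(c1 == c2 || r1 == r2) && !((c1 - c2).natAbs == (r1 - r2).natAbs)) = true ↔
    (c1 ≠ c2 ∧ r1 ≠ r2 ∧ c1 - r1 ≠ c2 - r2 ∧ c1 + r1 ≠ c2 + r2) := by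
  simp only [Bool.and_eq_true, Bool.not_eq_true', Bool.or_eq_false_iff, beq_eq_false_iff_ne,
    ne_eq]
  omega

-- A's nested loops over range(a,b)/range(i+1,b) test exactly Pairwise on the range
lemma allPairs_iff (P : Int → Int → Bool) (b : Int) :
    ∀ (n : Nat) (a : Int), (b - a).toNat = n →
      ((((PySem.List.pyRange a b 1).all fun i =>
          (PySem.List.pyRange (i + 1) b 1).all fun j => P i j)) = true ↔
        (PySem.List.pyRange a b 1).Pairwise (fun i j => P i j = true)) := by
  intro n
  induction n with
  | zero =>
    intro a h
    rw [PySem.List.pyRange_one_eq_nil (by omega)]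
    simp
  | succ n ih =>
    intro a h
    rw [PySem.List.pyRange_one_cons (by omega)]
    simp only [List.all_cons, Bool.and_eq_true, List.all_eq_true, List.pairwise_cons,
      ih (a + 1) (by omega)]

-- B's loop returns true iff nothing hits the initial sets and the processed queens are pairwise conflict-free
lemma queensGo_iff (q : List (List Int)) :
    ∀ (is : List Int) (cols rows diag anti : PySem.Set Int),
      queensGo q is cols rows diag anti = true ↔
        ((∀ i ∈ is, qCol q i ∉ cols ∧ qRow q i ∉ rows ∧
            (qCol q i - qRow q i) ∉ diag ∧ (qCol q i + qRow q i) ∉ anti) ∧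
          is.Pairwise (fun i j => NoConf q i j)) := by
  intro is
  induction is with
  | nil => intro cols rows diag anti; simp [queensGo]
  | cons i is ih =>
    intro cols rows diag anti
    simp only [queensGo]
    by_cases h : (PySem.Set.contains cols (qCol q i) || PySem.Set.contains rows (qRow q i) ||
        PySem.Set.contains diag (qCol q i - qRow q i) ||
        PySem.Set.contains anti (qCol q i + qRow q i)) = true
    · rw [if_pos h]
      simp only [Bool.or_eq_true, PySem.Set.contains_iff] at h
      simp only [List.forall_mem_cons]
      tauto
    · rw [if_neg h]
      simp only [Bool.or_eq_true, PySem.Set.contains_iff] at h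
      push Not at h
      rw [ih]
      simp only [List.forall_mem_cons, List.pairwise_cons, PySem.Set.mem_add, NoConf]
      constructor
      · rintro ⟨hall, hpw⟩
        refine ⟨⟨⟨h.1.1.1, h.1.1.2, h.1.2, h.2⟩, fun j hj => ?_⟩, ⟨fun j hj => ?_, hpw⟩⟩
        · exact ⟨fun hc => (hall j hj).1 (Or.inl hc), fun hc => (hall j hj).2.1 (Or.inl hc),
            fun hc => (hall j hj).2.2.1 (Or.inl hc), fun hc => (hall j hj).2.2.2 (Or.inl hc)⟩
        · have := hall j hj
          exact ⟨fun e => this.1 (Or.inr e.symm), fun e => this.2.1 (Or.inr e.symm),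
            fun e => this.2.2.1 (Or.inr e.symm), fun e => this.2.2.2 (Or.inr e.symm)⟩
      · rintro ⟨⟨hi, hmem⟩, hnc, hpw⟩
        refine ⟨fun j hj => ?_, hpw⟩
        have h1 := hmem j hj
        have h2 := hnc j hj
        refine ⟨?_, ?_, ?_, ?_⟩
        · rintro (hc | hc)
          · exact h1.1 hc
          · exact h2.1 hc.symm
        · rintro (hc | hc)
          · exact h1.2.1 hc
          · exact h2.2.1 hc.symm
        · rintro (hc | hc)
          · exact h1.2.2.1 hc
          · exact h2.2.2.1 hc.symm
        · rintro (hc | hc)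
          · exact h1.2.2.2 hc
          · exact h2.2.2.2 hc.symm

-- the unconditional equality of the two ports
lemma queens_eq_alt (q : List (List Int)) : queens q = queens_alt q := by
  have hA : queens q = true ↔
      (PySem.List.pyRange 0 8 1).Pairwise (fun i j =>
        (!(qCol q i == qCol q j || qRow q i == qRow q j) &&
         !((qCol q i - qCol q j).natAbs == (qRow q i - qRow q j).natAbs)) = true) := by
    exact allPairs_iff _ 8 8 0 rfl
  have hB : queens_alt q = true ↔
      (PySem.List.pyRange 0 8 1).Pairwise (fun i j => NoConf q i j) := by
    rw [queens_alt, queensGo_iff]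
    simp [PySem.Set.empty]
  have hpw : ((PySem.List.pyRange 0 8 1).Pairwise (fun i j =>
      (!(qCol q i == qCol q j || qRow q i == qRow q j) &&
       !((qCol q i - qCol q j).natAbs == (qRow q i - qRow q j).natAbs)) = true)) ↔
      (PySem.List.pyRange 0 8 1).Pairwise (fun i j => NoConf q i j) := by
    constructor
    · exact fun h => h.imp (fun {i j} hij => (pair_iff _ _ _ _).mp hij)
    · exact fun h => h.imp (fun {i j} hij => (pair_iff _ _ _ _).mpr hij)
  cases hqa : queens q with
  | true => exact ((hB.mpr (hpw.mp (hA.mp hqa)))).symm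
  | false =>
    cases hqb : queens_alt q with
    | true => exact absurd (hA.mpr (hpw.mpr (hB.mp hqb))) (by simp [hqa])
    | false => rfl

-- ===== VERDICT (by name: the statement is the Claim_ definition above) =====
theorem queens_spec : Claim_equal_queens := by
  intro q _ _
  exact queens_eq_alt q
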